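-- pv_equiv track=rewrite | github.com/e32885717/parser_base | coords.py | partition_rectangle_cnt
-- ===== SOURCE A (Python) =====
-- def partition_rectangle_cnt(x, y, width, height, max_area):
--     number = 0
--     if width * height <= max_area:
--         number += 1
--     else:
--         if width > height:
--             half_width = width // 2
--             number += partition_rectangle_cnt(x, y, half_width, height, max_area)
--             number += partition_rectangle_cnt(x + half_width, y, width - half_width, height, max_area)
--         else:
--             half_height = height // 2
--             number += partition_rectangle_cnt(x, y, width, half_height, max_area)
--             number += partition_rectangle_cnt(x, y + half_height, width, height - half_height, max_area)
--     return number
-- ===== SOURCE B (Python) =====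
-- def partition_rectangle_cnt(x, y, width, height, max_area):
--     # Memoized recursion on (w, h) only: the count never depends on x, y,
--     # and only O(log w * log h) distinct dimension pairs arise from halving.
--     cache = {}
--
--     def cnt(w, h):
--         v = cache.get((w, h))
--         if v is None:
--             if w * h <= max_area:
--                 v = 1
--             elif w > h:
--                 hw = w // 2
--                 v = cnt(hw, h) + cnt(w - hw, h)
--             else:
--                 hh = h // 2
--                 v = cnt(w, hh) + cnt(w, h - hh)
--             cache[(w, h)] = v
--         return v
--
--     return cnt(width, height)
-- ===== Notes on version B (the rewrite author's own statement) =====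
-- stated objective: faster
-- what changed: B replaces A's plain recursion over every leaf rectangle by a memoized recursion keyed on (width,height) only: the count never depends on x,y, and repeated halving produces only O(log width * log height) distinct dimension pairs, so each is solved once and looked up thereafter.
-- outside the precondition, e.g. on partition_rectangle_cnt(0, 0, -8, -8, 8): A returns 8, B returns 8
import Mathlib
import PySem

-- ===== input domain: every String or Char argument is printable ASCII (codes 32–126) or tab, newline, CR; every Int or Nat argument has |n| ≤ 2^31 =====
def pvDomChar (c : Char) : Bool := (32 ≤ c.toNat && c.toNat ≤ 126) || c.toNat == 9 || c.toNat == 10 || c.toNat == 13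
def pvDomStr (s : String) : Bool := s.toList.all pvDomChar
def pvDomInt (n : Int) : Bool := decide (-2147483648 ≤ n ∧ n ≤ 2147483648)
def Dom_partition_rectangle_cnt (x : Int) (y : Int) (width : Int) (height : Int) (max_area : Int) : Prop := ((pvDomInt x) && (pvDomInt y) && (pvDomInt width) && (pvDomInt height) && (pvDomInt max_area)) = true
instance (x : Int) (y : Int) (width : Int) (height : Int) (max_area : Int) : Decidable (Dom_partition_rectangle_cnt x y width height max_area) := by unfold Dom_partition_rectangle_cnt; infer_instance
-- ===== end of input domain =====

-- B memoizes the subdivision count on (width, height) alone (the count never depends on x, y),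
-- collapsing the recursion tree to the few distinct dimension pairs halving can produce: faster.

-- ===== PORT A =====
-- Literal port of A's recursion; the Nat fuel only makes the recursion total in Lean
-- (inside Pre_ the fuel width.toNat + height.toNat + 1 is never exhausted, see pvAgo_stable).
def pvAgo : Nat → Int → Int → Int → Int → Int → Int
  | 0, _, _, _, _, _ => 0
  | Nat.succ f, x, y, w, h, m =>
    if w * h ≤ m then 1
    else if w > h then
      let hw := PySem.Int.floordiv w 2
      pvAgo f x y hw h m + pvAgo f (x + hw) y (w - hw) h m
    else
      let hh := PySem.Int.floordiv h 2
      pvAgo f x y w hh m + pvAgo f x (y + hh) w (h - hh) m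

def partition_rectangle_cnt (x : Int) (y : Int) (width : Int) (height : Int) (max_area : Int) : Int :=
  pvAgo (width.toNat + height.toNat + 1) x y width height max_area

-- ===== PORT B =====
-- Literal port of Source B's inner cnt(w, h): the cache dict is threaded through; fuel as above.
def pvBgo : Nat → Int → Int → Int → PySem.Dict (Int × Int) Int → Int × PySem.Dict (Int × Int) Int
  | 0, _, _, _, c => (0, c)
  | Nat.succ f, m, w, h, c =>
    match PySem.Dict.get? c (w, h) with
    | some v => (v, c)
    | none =>
      if w * h ≤ m then (1, PySem.Dict.insert c (w, h) 1)
      else if w > h then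
        let hw := PySem.Int.floordiv w 2
        let r1 := pvBgo f m hw h c
        let r2 := pvBgo f m (w - hw) h r1.2
        (r1.1 + r2.1, PySem.Dict.insert r2.2 (w, h) (r1.1 + r2.1))
      else
        let hh := PySem.Int.floordiv h 2
        let r1 := pvBgo f m w hh c
        let r2 := pvBgo f m w (h - hh) r1.2
        (r1.1 + r2.1, PySem.Dict.insert r2.2 (w, h) (r1.1 + r2.1))

def partition_rectangle_cnt_alt (x : Int) (y : Int) (width : Int) (height : Int) (max_area : Int) : Int :=
  (pvBgo (width.toNat + height.toNat + 1) max_area width height PySem.Dict.empty).1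

-- ===== PRECONDITION & SPEC =====
-- Pre_ excludes the inputs on which A's recursion never terminates (RecursionError): whenever the
-- area exceeds max_area, A keeps halving, which only makes progress for positive dimensions with
-- max_area ≥ 1.  It also excludes negative-width-and-negative-height rectangles with positive area
-- > max_area, on which A diverges for almost all sizes and terminates only on a scattered
-- accidental set (e.g. width = height = -8, max_area = 8), where B returns the same value anyway.
def Pre_partition_rectangle_cnt (x : Int) (y : Int) (width : Int) (height : Int) (max_area : Int) : Prop :=
  width * height ≤ max_area ∨ (1 ≤ width ∧ 1 ≤ height ∧ 1 ≤ max_area)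
instance (x : Int) (y : Int) (width : Int) (height : Int) (max_area : Int) : Decidable (Pre_partition_rectangle_cnt x y width height max_area) := by unfold Pre_partition_rectangle_cnt; infer_instance

def pvWitness_partition_rectangle_cnt : Int × Int × Int × Int × Int := (0, 0, 2, 2, 1)

def Spec_partition_rectangle_cnt (x : Int) (y : Int) (width : Int) (height : Int) (max_area : Int) (out : Int) : Prop := out = partition_rectangle_cnt_alt x y width height max_area
instance (x : Int) (y : Int) (width : Int) (height : Int) (max_area : Int) (out : Int) : Decidable (Spec_partition_rectangle_cnt x y width height max_area out) := by unfold Spec_partition_rectangle_cnt; infer_instance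

-- ===== CLAIM (what is proved, stated in full; the proofs are below) =====
def Claim_equal_partition_rectangle_cnt : Prop := ∀ (x : Int) (y : Int) (width : Int) (height : Int) (max_area : Int), Dom_partition_rectangle_cnt x y width height max_area → Pre_partition_rectangle_cnt x y width height max_area → Spec_partition_rectangle_cnt x y width height max_area (partition_rectangle_cnt x y width height max_area)

-- ===== LEMMAS AND PROOFS =====

-- The inputs on which the recursion is well defined (exactly Pre_, ignoring x, y).
def pvGood (m w h : Int) : Prop := w * h ≤ m ∨ (1 ≤ w ∧ 1 ≤ h ∧ 1 ≤ m)

-- The common value: A's recursion at x = y = 0 with just-sufficient fuel.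
def pvS (m w h : Int) : Int := pvAgo (w.toNat + h.toNat + 1) 0 0 w h m

-- A's value is independent of x, y and of the fuel, as long as the fuel is sufficient.
lemma pvAgo_stable : ∀ n m w h, w.toNat + h.toNat = n → pvGood m w h →
    ∀ fuel x y, w.toNat + h.toNat + 1 ≤ fuel → pvAgo fuel x y w h m = pvS m w h := by
  intro n
  induction n using Nat.strong_induction_on with
  | _ n ih =>
    intro m w h hn hg fuel x y hf
    obtain ⟨f, rfl⟩ : ∃ f, fuel = f + 1 := ⟨fuel - 1, by omega⟩
    unfold pvS
    by_cases hleaf : w * h ≤ m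
    · simp [pvAgo, hleaf]
    · have hg' : 1 ≤ w ∧ 1 ≤ h ∧ 1 ≤ m := hg.resolve_left hleaf
      by_cases hwh : w > h
      · have hw2 : 2 ≤ w := by omega
        have g1 : pvGood m (w / 2) h := Or.inr ⟨by omega, hg'.2.1, hg'.2.2⟩
        have g2 : pvGood m (w - w / 2) h := Or.inr ⟨by omega, hg'.2.1, hg'.2.2⟩
        have e1 := ih _ (by omega) m (w / 2) h rfl g1
        have e2 := ih _ (by omega) m (w - w / 2) h rfl g2
        rw [show pvAgo (f + 1) x y w h m =
              pvAgo f x y (w / 2) h m + pvAgo f (x + w / 2) y (w - w / 2) h m by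
            simp [pvAgo, hleaf, hwh, PySem.Int.floordiv_eq_ediv_of_pos (a := w) (b := 2) (by omega)],
          show pvAgo (w.toNat + h.toNat + 1) 0 0 w h m =
              pvAgo (w.toNat + h.toNat) 0 0 (w / 2) h m
                + pvAgo (w.toNat + h.toNat) (w / 2) 0 (w - w / 2) h m by
            simp [pvAgo, hleaf, hwh, PySem.Int.floordiv_eq_ediv_of_pos (a := w) (b := 2) (by omega)]]
        rw [e1 f x y (by omega), e1 _ 0 0 (by omega),
          e2 f (x + w / 2) y (by omega), e2 _ (w / 2) 0 (by omega)]
      · have hh2 : 2 ≤ h := by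
          rcases hg' with ⟨a, b, c⟩
          by_contra hc
          have h1 : h = 1 := by omega
          have h2 : w = 1 := by omega
          rw [h1, h2] at hleaf
          omega
        have g1 : pvGood m w (h / 2) := Or.inr ⟨hg'.1, by omega, hg'.2.2⟩
        have g2 : pvGood m w (h - h / 2) := Or.inr ⟨hg'.1, by omega, hg'.2.2⟩
        have e1 := ih _ (by omega) m w (h / 2) rfl g1
        have e2 := ih _ (by omega) m w (h - h / 2) rfl g2
        rw [show pvAgo (f + 1) x y w h m =
              pvAgo f x y w (h / 2) m + pvAgo f x (y + h / 2) w (h - h / 2) m by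
            simp [pvAgo, hleaf, hwh, PySem.Int.floordiv_eq_ediv_of_pos (a := h) (b := 2) (by omega)],
          show pvAgo (w.toNat + h.toNat + 1) 0 0 w h m =
              pvAgo (w.toNat + h.toNat) 0 0 w (h / 2) m
                + pvAgo (w.toNat + h.toNat) 0 (h / 2) w (h - h / 2) m by
            simp [pvAgo, hleaf, hwh, PySem.Int.floordiv_eq_ediv_of_pos (a := h) (b := 2) (by omega)]]
        rw [e1 f x y (by omega), e1 _ 0 0 (by omega),
          e2 f x (y + h / 2) (by omega), e2 _ 0 (h / 2) (by omega)]

lemma pvS_leaf {m w h : Int} (hleaf : w * h ≤ m) : pvS m w h = 1 := by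
  simp [pvS, pvAgo, hleaf]

-- Cache invariant: every cached value is the true count for its key.
def pvInv (m : Int) (c : PySem.Dict (Int × Int) Int) : Prop :=
  ∀ p v, PySem.Dict.get? c p = some v → v = pvS m p.1 p.2

lemma pvInv_empty (m : Int) : pvInv m PySem.Dict.empty := by
  intro p v hpv
  simp [PySem.Dict.get?_empty] at hpv

lemma pvInv_insert {m : Int} {c : PySem.Dict (Int × Int) Int} (hc : pvInv m c)
    {w h v : Int} (hv : v = pvS m w h) : pvInv m (PySem.Dict.insert c (w, h) v) := by
  intro p u hpu
  rw [PySem.Dict.get?_insert] at hpu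
  by_cases hp : p = (w, h)
  · simp [hp] at hpu; subst hpu; simpa [hp] using hv
  · exact hc p u (by simpa [hp] using hpu)

-- B's memoized recursion computes pvS and preserves the invariant.
lemma pvBgo_correct : ∀ fuel m w h c, pvGood m w h → pvInv m c →
    w.toNat + h.toNat + 1 ≤ fuel →
    (pvBgo fuel m w h c).1 = pvS m w h ∧ pvInv m (pvBgo fuel m w h c).2 := by
  intro fuel
  induction fuel with
  | zero => intro m w h c _ _ hf; omega
  | succ f ihf =>
    intro m w h c hg hc hf
    rcases hhit : PySem.Dict.get? c (w, h) with _ | v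
    · by_cases hleaf : w * h ≤ m
      · refine ⟨?_, ?_⟩
        · simp [pvBgo, hhit, hleaf, pvS_leaf hleaf]
        · simpa [pvBgo, hhit, hleaf] using pvInv_insert hc (pvS_leaf hleaf).symm
      · have hg' : 1 ≤ w ∧ 1 ≤ h ∧ 1 ≤ m := hg.resolve_left hleaf
        by_cases hwh : w > h
        · have hw2 : 2 ≤ w := by omega
          have g1 : pvGood m (w / 2) h := Or.inr ⟨by omega, hg'.2.1, hg'.2.2⟩
          have g2 : pvGood m (w - w / 2) h := Or.inr ⟨by omega, hg'.2.1, hg'.2.2⟩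
          obtain ⟨e1, i1⟩ := ihf m (w / 2) h c g1 hc (by omega)
          obtain ⟨e2, i2⟩ := ihf m (w - w / 2) h _ g2 i1 (by omega)
          have hsplit : pvS m w h = pvS m (w / 2) h + pvS m (w - w / 2) h := by
            rw [← pvAgo_stable (w.toNat + h.toNat) m w h rfl hg
                (w.toNat + h.toNat + 1) 0 0 (by omega),
              show pvAgo (w.toNat + h.toNat + 1) 0 0 w h m =
                pvAgo (w.toNat + h.toNat) 0 0 (w / 2) h m
                  + pvAgo (w.toNat + h.toNat) (w / 2) 0 (w - w / 2) h m by
                simp [pvAgo, hleaf, hwh, PySem.Int.floordiv_eq_ediv_of_pos (a := w) (b := 2) (by omega)],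
              pvAgo_stable ((w / 2).toNat + h.toNat) m (w / 2) h rfl g1 _ 0 0 (by omega),
              pvAgo_stable ((w - w / 2).toNat + h.toNat) m (w - w / 2) h rfl g2 _ (w / 2) 0 (by omega)]
          have hstep : pvBgo (f + 1) m w h c =
              ((pvBgo f m (w / 2) h c).1 + (pvBgo f m (w - w / 2) h (pvBgo f m (w / 2) h c).2).1,
                PySem.Dict.insert (pvBgo f m (w - w / 2) h (pvBgo f m (w / 2) h c).2).2 (w, h)
                  ((pvBgo f m (w / 2) h c).1 + (pvBgo f m (w - w / 2) h (pvBgo f m (w / 2) h c).2).1)) := by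
            simp [pvBgo, hhit, hleaf, hwh, PySem.Int.floordiv_eq_ediv_of_pos (a := w) (b := 2) (by omega)]
          rw [hstep]
          refine ⟨by rw [e1, e2, hsplit], ?_⟩
          exact pvInv_insert i2 (by rw [e1, e2, hsplit])
        · have hh2 : 2 ≤ h := by
            rcases hg' with ⟨a, b, cc⟩
            by_contra hcn
            have hh1 : h = 1 := by omega
            have hw1 : w = 1 := by omega
            rw [hh1, hw1] at hleaf
            omega
          have g1 : pvGood m w (h / 2) := Or.inr ⟨hg'.1, by omega, hg'.2.2⟩
          have g2 : pvGood m w (h - h / 2) := Or.inr ⟨hg'.1, by omega, hg'.2.2⟩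
          obtain ⟨e1, i1⟩ := ihf m w (h / 2) c g1 hc (by omega)
          obtain ⟨e2, i2⟩ := ihf m w (h - h / 2) _ g2 i1 (by omega)
          have hsplit : pvS m w h = pvS m w (h / 2) + pvS m w (h - h / 2) := by
            rw [← pvAgo_stable (w.toNat + h.toNat) m w h rfl hg
                (w.toNat + h.toNat + 1) 0 0 (by omega),
              show pvAgo (w.toNat + h.toNat + 1) 0 0 w h m =
                pvAgo (w.toNat + h.toNat) 0 0 w (h / 2) m
                  + pvAgo (w.toNat + h.toNat) 0 (h / 2) w (h - h / 2) m by
                simp [pvAgo, hleaf, hwh, PySem.Int.floordiv_eq_ediv_of_pos (a := h) (b := 2) (by omega)],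
              pvAgo_stable (w.toNat + (h / 2).toNat) m w (h / 2) rfl g1 _ 0 0 (by omega),
              pvAgo_stable (w.toNat + (h - h / 2).toNat) m w (h - h / 2) rfl g2 _ 0 (h / 2) (by omega)]
          have hstep : pvBgo (f + 1) m w h c =
              ((pvBgo f m w (h / 2) c).1 + (pvBgo f m w (h - h / 2) (pvBgo f m w (h / 2) c).2).1,
                PySem.Dict.insert (pvBgo f m w (h - h / 2) (pvBgo f m w (h / 2) c).2).2 (w, h)
                  ((pvBgo f m w (h / 2) c).1 + (pvBgo f m w (h - h / 2) (pvBgo f m w (h / 2) c).2).1)) := by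
            simp [pvBgo, hhit, hleaf, hwh, PySem.Int.floordiv_eq_ediv_of_pos (a := h) (b := 2) (by omega)]
          rw [hstep]
          refine ⟨by rw [e1, e2, hsplit], ?_⟩
          exact pvInv_insert i2 (by rw [e1, e2, hsplit])
    · exact ⟨by simp [pvBgo, hhit, hc _ _ hhit], by simpa [pvBgo, hhit] using hc⟩

-- ===== VERDICT (by name: the statement is the Claim_ definition above) =====
theorem partition_rectangle_cnt_spec : Claim_equal_partition_rectangle_cnt := by
  intro x y w h m _ hpre
  unfold Spec_partition_rectangle_cnt partition_rectangle_cnt partition_rectangle_cnt_alt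
  have hg : pvGood m w h := hpre
  rw [pvAgo_stable (w.toNat + h.toNat) m w h rfl hg _ x y (by omega)]
  exact ((pvBgo_correct _ m w h PySem.Dict.empty hg (pvInv_empty m) (by omega)).1).symm
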